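-- pv_equiv track=rewrite | github.com/kpblcaoo/sboxmgr | scripts/fix_docstring_structure.py | fix_d203_class_docstring
-- ===== SOURCE A (Python) =====
-- def fix_d203_class_docstring(content: str) -> str:
--     """Add blank line before class docstring (D203)."""
--     lines = content.split('\n')
--     fixed_lines = []
--     i = 0
--
--     while i < len(lines):
--         line = lines[i]
--         fixed_lines.append(line)
--
--         # Check if this is a class definition
--         if line.strip().startswith('class ') and ':' in line:
--             # Look ahead for docstring
--             j = i + 1
--             while j < len(lines) and lines[j].strip() == '':
--                 j += 1
--
--             if j < len(lines) and lines[j].strip().startswith('"""'):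
--                 # Found docstring, check if we need to add blank line
--                 if j > i + 1:  # There's already a blank line
--                     pass
--                 else:  # Need to add blank line
--                     fixed_lines.append('')
--
--         i += 1
--
--     return '\n'.join(fixed_lines)
-- ===== SOURCE B (Python) =====
-- def fix_d203_class_docstring(content: str) -> str:
--     """Add blank line before class docstring (D203)."""
--     out = []
--     prev = None
--     for line in content.split('\n'):
--         if (prev is not None and prev.strip().startswith('class ')
--                 and ':' in prev and line.strip().startswith('"""')):
--             out.append('')
--         out.append(line)
--         prev = line
--     return '\n'.join(out)
-- ===== Notes on version B (the rewrite author's own statement) =====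
-- stated objective: simpler
-- what changed: Replaces A's index loop with a forward blank-skipping look-ahead (which is dead code: insertion only happens when the docstring is immediately next) by a single pass that remembers the previous line and inserts a blank before a docstring line that directly follows a class definition.
import Mathlib
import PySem

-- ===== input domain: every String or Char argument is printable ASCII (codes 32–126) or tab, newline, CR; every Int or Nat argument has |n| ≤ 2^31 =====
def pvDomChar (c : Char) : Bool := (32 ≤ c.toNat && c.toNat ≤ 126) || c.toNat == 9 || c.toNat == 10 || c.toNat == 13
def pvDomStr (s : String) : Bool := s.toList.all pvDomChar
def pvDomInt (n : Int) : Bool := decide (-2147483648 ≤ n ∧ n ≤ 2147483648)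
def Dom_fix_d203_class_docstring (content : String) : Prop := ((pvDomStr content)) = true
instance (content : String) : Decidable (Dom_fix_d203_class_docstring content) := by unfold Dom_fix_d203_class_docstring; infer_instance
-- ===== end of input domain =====

-- B replaces A's forward blank-skipping look-ahead (dead for the insertion decision) by a
-- single previous-line pass; objective: simpler. Equivalence proved on all of Dom.

-- ===== PORT A =====
-- line.strip().startswith('class ') and ':' in line
def pvAClass (line : String) : Bool :=
  PySem.Str.startswith (PySem.Str.strip line) "class " && PySem.Str.isIn ":" line

-- lines[j].strip().startswith('"""')
def pvADoc (line : String) : Bool :=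
  PySem.Str.startswith (PySem.Str.strip line) "\"\"\""

-- the inner 'while j < len(lines) and lines[j].strip() == "": j += 1' (returns lines[j:])
def pvASkip : List String → List String
  | [] => []
  | l :: ls => if PySem.Str.strip l == "" then pvASkip ls else l :: ls

-- the outer 'while i < len(lines)' loop, building fixed_lines
def pvALoop : List String → List String
  | [] => []
  | line :: rest =>
    line ::
      (if pvAClass line then
        match pvASkip rest with
        | doc :: _ =>
          if pvADoc doc then
            -- 'j > i + 1' ↔ the skip loop dropped at least one blank line
            if (pvASkip rest).length = rest.length then "" :: pvALoop rest
            else pvALoop rest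
          else pvALoop rest
        | [] => pvALoop rest
      else pvALoop rest)

def fix_d203_class_docstring (content : String) : String :=
  PySem.Str.join "\n" (pvALoop ((PySem.Str.split? content "\n").getD []))

-- ===== PORT B =====
def pvBClass (line : String) : Bool :=
  PySem.Str.startswith (PySem.Str.strip line) "class " && PySem.Str.isIn ":" line

def pvBDoc (line : String) : Bool :=
  PySem.Str.startswith (PySem.Str.strip line) "\"\"\""

-- 'prev is not None and prev is a class def and line is a docstring line'
def pvBCond (prev : Option String) (line : String) : Bool :=
  match prev with
  | some p => pvBClass p && pvBDoc line
  | none => false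

-- the 'for line in lines' loop over state (out, prev)
def pvBStep (st : List String × Option String) (line : String) : List String × Option String :=
  ((if pvBCond st.2 line then st.1 ++ ["", line] else st.1 ++ [line]), some line)

def fix_d203_class_docstring_alt (content : String) : String :=
  PySem.Str.join "\n" (((((PySem.Str.split? content "\n").getD []).foldl pvBStep ([], none)).1))

-- ===== PRECONDITION & SPEC =====
def Spec_fix_d203_class_docstring (content : String) (out : String) : Prop := out = fix_d203_class_docstring_alt content
instance (content : String) (out : String) : Decidable (Spec_fix_d203_class_docstring content out) := by unfold Spec_fix_d203_class_docstring; infer_instance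

-- ===== CLAIM (what is proved, stated in full; the proofs are below) =====
def Claim_equal_fix_d203_class_docstring : Prop := ∀ (content : String), Dom_fix_d203_class_docstring content → Spec_fix_d203_class_docstring content (fix_d203_class_docstring content)

-- ===== LEMMAS AND PROOFS =====

lemma pvASkip_length_le (ls : List String) : (pvASkip ls).length ≤ ls.length := by
  induction ls with
  | nil => simp [pvASkip]
  | cons l ls ih => simp only [pvASkip]; split_ifs <;> simp <;> omega

-- a blank line is not a docstring line
lemma pvADoc_of_blank (r : String) (h : (PySem.Str.strip r == "") = true) : pvADoc r = false := by
  unfold pvADoc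
  rw [eq_of_beq h]
  decide

-- head-of-list docstring test
def pvHeadDoc : List String → Bool
  | [] => false
  | r :: _ => pvADoc r

-- A's step inserts '' exactly when the very next line is a docstring line
lemma pvALoop_cons (line : String) (rest : List String) :
    pvALoop (line :: rest) =
      line :: (if pvAClass line && pvHeadDoc rest then "" :: pvALoop rest else pvALoop rest) := by
  simp only [pvALoop]
  by_cases hc : pvAClass line
  · simp only [hc, if_true, Bool.true_and]
    cases rest with
    | nil => simp [pvASkip, pvHeadDoc]
    | cons r rs =>
      by_cases hb : (PySem.Str.strip r == "") = true
      · have hlen : (pvASkip (r :: rs)).length ≠ (r :: rs).length := by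
          simp only [pvASkip, hb, if_true]
          have := pvASkip_length_le rs
          simp only [List.length_cons]
          omega
        have hdoc : pvHeadDoc (r :: rs) = false := by
          simp [pvHeadDoc, pvADoc_of_blank r hb]
        rw [hdoc]
        cases hsk : pvASkip (r :: rs) with
        | nil => simp
        | cons d ds =>
          rw [hsk] at hlen
          simp only [List.length_cons] at hlen
          simp only [hsk]
          simp
          intro _
          omega
      · have hskip : pvASkip (r :: rs) = r :: rs := by
          simp [pvASkip, hb]
        rw [hskip]
        simp only [pvHeadDoc, List.length_cons]
        by_cases hd : pvADoc r <;> simp [hd]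
  · simp [hc]

-- B's run from a given previous line, as a pure function
def pvBRun (prev : Option String) : List String → List String
  | [] => []
  | line :: rest => (if pvBCond prev line then ["", line] else [line]) ++ pvBRun (some line) rest

lemma pvBFold (ls : List String) (out : List String) (prev : Option String) :
    (ls.foldl pvBStep (out, prev)).1 = out ++ pvBRun prev ls := by
  induction ls generalizing out prev with
  | nil => simp [pvBRun]
  | cons line rest ih =>
    simp only [List.foldl_cons, pvBStep, pvBRun]
    by_cases h : pvBCond prev line <;> simp [h, ih]

-- the class test on an optional previous line
def pvPrevClass : Option String → Bool
  | none => false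
  | some p => pvAClass p

lemma pvBRun_eq_pvALoop (ls : List String) :
    ∀ prev, pvBRun prev ls = (if pvPrevClass prev && pvHeadDoc ls then [""] else []) ++ pvALoop ls := by
  induction ls with
  | nil => intro prev; simp [pvBRun, pvHeadDoc, pvALoop]
  | cons line rest ih =>
    intro prev
    have hcond : pvBCond prev line = (pvPrevClass prev && pvADoc line) := by
      cases prev <;> simp [pvBCond, pvPrevClass, pvBClass, pvBDoc, pvAClass, pvADoc]
    have hhd : pvHeadDoc (line :: rest) = pvADoc line := rfl
    simp only [pvBRun, ih (some line), hcond, pvALoop_cons, hhd]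
    have hps : pvPrevClass (some line) = pvAClass line := rfl
    rw [hps]
    cases hp : pvPrevClass prev <;> cases hd : pvADoc line <;>
      cases hc : pvAClass line <;> cases hr : pvHeadDoc rest <;>
        simp [hp, hd, hc, hr]

-- ===== VERDICT (by name: the statement is the Claim_ definition above) =====
theorem fix_d203_class_docstring_spec : Claim_equal_fix_d203_class_docstring := by
  intro content _
  unfold Spec_fix_d203_class_docstring fix_d203_class_docstring fix_d203_class_docstring_alt
  rw [pvBFold, pvBRun_eq_pvALoop]
  simp [pvPrevClass]
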